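-- pv_equiv track=rewrite | github.com/nbramia/LifeOS | api/services/person_facts.py | _format_interactions_for_summary
-- ===== SOURCE A (Python) =====
-- def _format_interactions_for_summary(interactions: list) -> str:
--     """Format interactions in a condensed way for summary generation."""
--     lines = []
--
--     # Group by year/month for temporal context
--     by_period: dict[str, list] = {}
--     for interaction in interactions:
--         timestamp = interaction.get("timestamp", "")
--         if timestamp:
--             period = timestamp[:7]  # YYYY-MM
--         else:
--             period = "unknown"
--
--         if period not in by_period:
--             by_period[period] = []
--         by_period[period].append(interaction)
--
--     # Format grouped interactions
--     for period in sorted(by_period.keys(), reverse=True):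
--         period_interactions = by_period[period]
--         lines.append(f"\n--- {period} ({len(period_interactions)} interactions) ---")
--
--         for interaction in period_interactions[:20]:  # Limit per period
--             source_type = interaction.get("source_type", "")
--             title = interaction.get("title", "")
--             snippet = interaction.get("snippet", "")[:200] if interaction.get("snippet") else ""
--
--             lines.append(f"[{source_type}] {title}")
--             if snippet:
--                 lines.append(f"  {snippet}")
--
--     return "\n".join(lines[:200])  # Limit total lines
-- ===== SOURCE B (Python) =====
-- def _format_interactions_for_summary(interactions: list) -> str:
--     """Format interactions in a condensed way for summary generation.
--
--     Alternative decomposition: sort the distinct period keys descending and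
--     collect each period's interactions with a filter pass, instead of
--     building a dict-of-lists index first.
--     """
--
--     def period_of(interaction):
--         timestamp = interaction.get("timestamp", "")
--         return timestamp[:7] if timestamp else "unknown"
--
--     def entry_lines(interaction):
--         snippet = interaction.get("snippet") or ""
--         out = [f"[{interaction.get('source_type', '')}] {interaction.get('title', '')}"]
--         if snippet:
--             out.append(f"  {snippet[:200]}")
--         return out
--
--     lines = []
--     for period in sorted({period_of(i) for i in interactions}, reverse=True):
--         group = [i for i in interactions if period_of(i) == period]
--         lines.append(f"\n--- {period} ({len(group)} interactions) ---")
--         for interaction in group[:20]: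
--             lines.extend(entry_lines(interaction))
--     return "\n".join(lines[:200])
-- ===== Notes on version B (the rewrite author's own statement) =====
-- stated objective: alternative
-- what changed: Replaces A's dict-of-lists grouping index (one pass building by_period, then sorted(keys)) by sorting the distinct period keys descending and collecting each period's group with a filter pass over the input.
import Mathlib
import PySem

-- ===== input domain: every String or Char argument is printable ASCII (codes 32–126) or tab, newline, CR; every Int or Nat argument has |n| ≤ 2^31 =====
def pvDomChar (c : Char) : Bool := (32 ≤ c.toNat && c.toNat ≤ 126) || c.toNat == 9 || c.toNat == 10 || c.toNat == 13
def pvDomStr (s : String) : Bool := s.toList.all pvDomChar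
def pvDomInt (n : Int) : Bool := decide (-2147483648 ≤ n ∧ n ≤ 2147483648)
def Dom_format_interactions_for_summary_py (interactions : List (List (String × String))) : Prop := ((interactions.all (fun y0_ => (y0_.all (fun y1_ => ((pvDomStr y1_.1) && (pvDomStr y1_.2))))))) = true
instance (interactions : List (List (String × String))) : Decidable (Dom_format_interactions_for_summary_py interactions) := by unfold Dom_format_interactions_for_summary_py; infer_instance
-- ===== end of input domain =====

-- B re-implements A with a different decomposition (sorted distinct keys + filter pass per period,
-- no dict-of-lists index); same return value, no speed claim.

-- ===== PORT A =====
-- A, lines 8-12: timestamp[:7] if timestamp else "unknown"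
def pvPeriodA (interaction : List (String × String)) : String :=
  let timestamp := (PySem.Dict.mk interaction).getD "timestamp" ""
  if timestamp ≠ "" then PySem.Str.slice timestamp none (some 7) else "unknown"

-- A, inner loop body (lines 23-30): the two appends for one interaction
def pvFormatOneA (lines : List String) (interaction : List (String × String)) : List String :=
  let source_type := (PySem.Dict.mk interaction).getD "source_type" ""
  let title := (PySem.Dict.mk interaction).getD "title" ""
  let snippet := match (PySem.Dict.mk interaction).get? "snippet" with
    | some s => if s ≠ "" then PySem.Str.slice s none (some 200) else ""
    | none => ""
  let lines := lines ++ ["[" ++ source_type ++ "] " ++ title]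
  if snippet ≠ "" then lines ++ ["  " ++ snippet] else lines

def format_interactions_for_summary_py (interactions : List (List (String × String))) : String :=
  let by_period : PySem.Dict String (List (List (String × String))) :=
    interactions.foldl (fun d interaction => d.modify (pvPeriodA interaction) [] (· ++ [interaction]))
      PySem.Dict.empty
  let lines : List String :=
    (PySem.List.sorted by_period.keys (fun k => k) true).foldl (fun lines period =>
      let period_interactions := by_period.getD period []
      let lines := lines ++ ["\n--- " ++ period ++ " (" ++ PySem.Int.toStr period_interactions.length ++ " interactions) ---"]
      (PySem.List.slice period_interactions none (some 20)).foldl pvFormatOneA lines) []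
  PySem.Str.join "\n" (PySem.List.slice lines none (some 200))

-- ===== PORT B =====
-- Source B period_of
def pvPeriodB (interaction : List (String × String)) : String :=
  let timestamp := (PySem.Dict.mk interaction).getD "timestamp" ""
  if timestamp ≠ "" then PySem.Str.slice timestamp none (some 7) else "unknown"

-- Source B entry_lines
def pvEntryLinesB (interaction : List (String × String)) : List String :=
  let snippet := ((PySem.Dict.mk interaction).get? "snippet").getD ""
  let out := ["[" ++ (PySem.Dict.mk interaction).getD "source_type" "" ++ "] "
                ++ (PySem.Dict.mk interaction).getD "title" ""]
  if snippet ≠ "" then out ++ ["  " ++ PySem.Str.slice snippet none (some 200)] else out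

def format_interactions_for_summary_py_alt (interactions : List (List (String × String))) : String :=
  let lines : List String :=
    (PySem.List.sorted (PySem.Set.ofList (interactions.map pvPeriodB)) (fun k => k) true).foldl
      (fun lines period =>
        let group := interactions.filter (fun i => pvPeriodB i == period)
        (PySem.List.slice group none (some 20)).foldl (fun lines i => lines ++ pvEntryLinesB i)
          (lines ++ ["\n--- " ++ period ++ " (" ++ PySem.Int.toStr group.length ++ " interactions) ---"])) []
  PySem.Str.join "\n" (PySem.List.slice lines none (some 200))

-- ===== PRECONDITION & SPEC =====
def Spec_format_interactions_for_summary_py (interactions : List (List (String × String))) (out : String) : Prop := out = format_interactions_for_summary_py_alt interactions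
instance (interactions : List (List (String × String))) (out : String) : Decidable (Spec_format_interactions_for_summary_py interactions out) := by unfold Spec_format_interactions_for_summary_py; infer_instance

-- ===== CLAIM (what is proved, stated in full; the proofs are below) =====
def Claim_equal_format_interactions_for_summary_py : Prop := ∀ (interactions : List (List (String × String))), Dom_format_interactions_for_summary_py interactions → Spec_format_interactions_for_summary_py interactions (format_interactions_for_summary_py interactions)

-- ===== LEMMAS AND PROOFS =====

theorem pvPeriodB_eq : pvPeriodB = pvPeriodA := rfl

-- a nonempty string stays nonempty after s[:200]
theorem pvSlice200_ne (s : String) (h : s ≠ "") : PySem.Str.slice s none (some 200) ≠ "" := by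
  intro hc
  apply h
  have h2 := congrArg String.toList hc
  simp only [PySem.Str.toList_slice, PySem.Chars.slice_eq_listSlice] at h2
  rw [show ((200:Int)) = ((200:Nat):Int) by norm_num, PySem.List.slice_to_natCast] at h2
  have hnil : s.toList = [] := by
    cases hs : s.toList with
    | nil => rfl
    | cons a t => rw [hs] at h2; simp at h2
  exact String.ext (by simpa using hnil)

-- A's inner loop body appends exactly B's entry_lines
theorem pvFormatOneA_eq (lines : List String) (i : List (String × String)) :
    pvFormatOneA lines i = lines ++ pvEntryLinesB i := by
  unfold pvFormatOneA pvEntryLinesB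
  cases hm : (PySem.Dict.mk i).get? "snippet" with
  | none => simp
  | some s =>
    by_cases hs : s = ""
    · simp [hs]
    · simp [hs, pvSlice200_ne s hs]

-- the dict group for a key is the filter pass B performs
theorem pvGroup_eq (l : List (List (String × String))) (c : String) :
    (l.foldl (fun d i => d.modify (pvPeriodA i) [] (· ++ [i])) PySem.Dict.empty).getD c []
      = l.filter (fun i => pvPeriodB i == c) := by
  have h : l.foldl (fun d i => d.modify (pvPeriodA i) [] (· ++ [i])) PySem.Dict.empty
      = (l.map (fun i => (pvPeriodA i, i))).foldl (fun d p => d.modify p.1 [] (· ++ [p.2]))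
          PySem.Dict.empty := by
    rw [List.foldl_map]
  rw [h, PySem.Dict.getD_foldl_modify_append, pvPeriodB_eq]
  simp [List.filter_map, Function.comp_def]

theorem pvKeys_eq (l : List (List (String × String))) :
    (l.foldl (fun d i => d.modify (pvPeriodA i) [] (· ++ [i])) PySem.Dict.empty).keys
      = PySem.Set.ofList (l.map pvPeriodB) := by
  rw [PySem.Dict.keys_foldl_modify_key, pvPeriodB_eq]
  simp [PySem.Set.ofList_eq_foldl, PySem.Set.update, PySem.Dict.keys_empty]

-- ===== VERDICT (by name: the statement is the Claim_ definition above) =====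
theorem format_interactions_for_summary_py_spec : Claim_equal_format_interactions_for_summary_py := by
  intro interactions _
  show format_interactions_for_summary_py interactions = format_interactions_for_summary_py_alt interactions
  simp only [format_interactions_for_summary_py, format_interactions_for_summary_py_alt]
  rw [pvKeys_eq]
  congr 2
  apply PySem.List.foldl_congr_mem
  intro acc p _
  rw [pvGroup_eq]
  exact PySem.List.foldl_congr_mem _ _ _ _ (fun acc2 i _ => pvFormatOneA_eq acc2 i)
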